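-- pv_equiv track=rewrite | github.com/wu-lab-egio/EGIO | __EGIO.py | listwhich
-- ===== SOURCE A (Python) =====
-- def which(judge):
--     backdata = []
--     for i in range(0,len(judge)):
--         if judge[i]:
--             backdata.append(i)
--     return backdata
--
-- def listwhich(listdata,deal,value):
--     judge = []
--     for i in list(range(0,len(listdata))):
--         if deal == "==":
--             if listdata[i] == value:
--                 judge.append(True)
--             else:
--                 judge.append(False)
--         if deal == "!=":
--             if listdata[i] == value:
--                 judge.append(False)
--             else:
--                 judge.append(True)
--         if deal == ">":
--             if listdata[i] <= value:
--                 judge.append(False)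
--             else:
--                 judge.append(True)
--         if deal == ">=":
--             if listdata[i] < value:
--                 judge.append(False)
--             else:
--                 judge.append(True)
--         if deal == "<":
--             if listdata[i] >= value:
--                 judge.append(False)
--             else:
--                 judge.append(True)
--         if deal == "<=":
--             if listdata[i] > value:
--                 judge.append(False)
--             else:
--                 judge.append(True)
--     jindex = which(judge)
--     return(jindex)
-- ===== SOURCE B (Python) =====
-- # B: one direct pass — a dict maps each operator string to a comparison; unknown deal -> [].
-- def listwhich(listdata, deal, value):
--     ops = {
--         "==": lambda a, b: a == b,
--         "!=": lambda a, b: a != b,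
--         ">":  lambda a, b: a > b,
--         ">=": lambda a, b: a >= b,
--         "<":  lambda a, b: a < b,
--         "<=": lambda a, b: a <= b,
--     }
--     pred = ops.get(deal)
--     if pred is None:
--         return []
--     return [i for i, x in enumerate(listdata) if pred(x, value)]
-- ===== Notes on version B (the rewrite author's own statement) =====
-- stated objective: simpler
-- what changed: B replaces A's build-a-boolean-table-then-scan-it-with-which two-pass structure by a single enumerate pass filtered by one predicate looked up once in an operator dict; unknown operators yield [] directly instead of via an empty table.
import Mathlib
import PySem

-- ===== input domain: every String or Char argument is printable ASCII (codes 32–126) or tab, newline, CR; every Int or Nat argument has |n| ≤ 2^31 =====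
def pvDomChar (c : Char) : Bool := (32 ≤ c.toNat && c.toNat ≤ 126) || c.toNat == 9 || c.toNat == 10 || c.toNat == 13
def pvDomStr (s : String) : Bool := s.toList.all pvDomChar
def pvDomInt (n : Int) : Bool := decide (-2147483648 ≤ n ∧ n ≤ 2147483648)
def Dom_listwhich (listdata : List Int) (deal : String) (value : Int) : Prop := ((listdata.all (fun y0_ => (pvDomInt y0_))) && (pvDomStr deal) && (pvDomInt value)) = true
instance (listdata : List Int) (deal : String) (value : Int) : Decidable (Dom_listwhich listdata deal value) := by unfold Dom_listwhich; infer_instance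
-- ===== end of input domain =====

-- B replaces A's two passes (build a boolean table, then scan it with `which`) by one
-- dict-dispatched enumerate pass (objective: simpler).

-- ===== PORT A =====
-- helper `which(judge)` of A
def pvWhich (judge : List Bool) : List Int :=
  List.foldl
    (fun backdata i => if PySem.List.pyGetD judge i false then backdata ++ [i] else backdata)
    [] (PySem.List.pyRange 0 (judge.length : Int) 1)

-- the body of A's loop, extracted as a named helper (step for step: the six sequential ifs)
def pvJudgeStep (deal : String) (value : Int) (listdata : List Int)
    (judge : List Bool) (i : Int) : List Bool :=
  -- listdata[i]: i ∈ range(len(listdata)), always in range, so the default is never used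
  let x := PySem.List.pyGetD listdata i 0
  let judge := if deal == "==" then judge ++ [x == value] else judge
  let judge := if deal == "!=" then judge ++ [!(x == value)] else judge
  let judge := if deal == ">"  then judge ++ [decide (value < x)] else judge
  let judge := if deal == ">=" then judge ++ [decide (value ≤ x)] else judge
  let judge := if deal == "<"  then judge ++ [decide (x < value)] else judge
  let judge := if deal == "<=" then judge ++ [decide (x ≤ value)] else judge
  judge

def listwhich (listdata : List Int) (deal : String) (value : Int) : List Int :=
  pvWhich (List.foldl (pvJudgeStep deal value listdata) []
    (PySem.List.pyRange 0 (listdata.length : Int) 1))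

-- ===== PORT B =====
def pvOps : PySem.Dict String (Int → Int → Bool) :=
  PySem.Dict.ofList
    [("==", fun a b => a == b), ("!=", fun a b => !(a == b)),
     (">",  fun a b => decide (b < a)), (">=", fun a b => decide (b ≤ a)),
     ("<",  fun a b => decide (a < b)), ("<=", fun a b => decide (a ≤ b))]

def listwhich_alt (listdata : List Int) (deal : String) (value : Int) : List Int :=
  match PySem.Dict.get? pvOps deal with
  | none => []
  | some p =>
      (PySem.List.enumerate listdata).filterMap
        (fun ix => if p ix.2 value then some ix.1 else none)

-- ===== PRECONDITION & SPEC =====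
def Spec_listwhich (listdata : List Int) (deal : String) (value : Int) (out : List Int) : Prop := out = listwhich_alt listdata deal value
instance (listdata : List Int) (deal : String) (value : Int) (out : List Int) : Decidable (Spec_listwhich listdata deal value out) := by unfold Spec_listwhich; infer_instance

-- ===== CLAIM (what is proved, stated in full; the proofs are below) =====
def Claim_equal_listwhich : Prop := ∀ (listdata : List Int) (deal : String) (value : Int), Dom_listwhich listdata deal value → Spec_listwhich listdata deal value (listwhich listdata deal value)

-- ===== LEMMAS AND PROOFS =====

theorem filterMap_if_eq_filter (c : Int → Bool) (l : List Int) :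
    l.filterMap (fun j => if c j then some j else none) = l.filter c := by
  induction l with
  | nil => rfl
  | cons x xs ih =>
    by_cases h : c x <;> simp [h, ih]

theorem foldl_if_append_self (c : Int → Bool) (l : List Int) (acc : List Int) :
    l.foldl (fun a x => if c x then a ++ [x] else a) acc = acc ++ l.filter c := by
  induction l generalizing acc with
  | nil => simp
  | cons x xs ih =>
    by_cases h : c x <;> simp [h, ih]

theorem which_map_eq (xs : List Int) (q : Int → Bool) :
    pvWhich (xs.map q)
      = (PySem.List.enumerate xs).filterMap (fun ix => if q ix.2 then some ix.1 else none) := by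
  unfold pvWhich
  rw [foldl_if_append_self, List.nil_append]
  rw [PySem.List.enumerate_eq_map_pyRange xs 0, List.filterMap_map]
  rw [show ((fun (ix : Int × Int) => if q ix.2 then some ix.1 else none)
        ∘ fun j => (j, PySem.List.pyGetD xs j 0))
      = (fun j : Int => if q (PySem.List.pyGetD xs j 0) then some j else none) from rfl]
  rw [filterMap_if_eq_filter]
  simp only [List.length_map, PySem.List.len_eq]
  apply List.filter_congr
  intro j hj
  rw [PySem.List.mem_pyRange_one] at hj
  rw [PySem.List.pyGetD_eq_getElem (xs.map q) false hj.1 (by simpa using hj.2),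
      PySem.List.pyGetD_eq_getElem xs 0 hj.1 (by simpa using hj.2)]
  simp

theorem judge_known (xs : List Int) (q : Int → Bool) :
    List.foldl (fun judge i => judge ++ [q (PySem.List.pyGetD xs i 0)]) []
      (PySem.List.pyRange 0 ((xs.length : Int)) 1) = xs.map q := by
  rw [PySem.List.foldl_pyRange_zero_pyGetD' xs 0 (fun acc x => acc ++ [q x]) []]
  rw [PySem.List.foldl_append_singleton_eq_map, List.nil_append]

theorem known_case (l : List Int) (d : String) (v : Int) (p : Int → Int → Bool)
    (hstep : pvJudgeStep d v l = fun judge i => judge ++ [p (PySem.List.pyGetD l i 0) v])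
    (hget : PySem.Dict.get? pvOps d = some p) :
    listwhich l d v = listwhich_alt l d v := by
  unfold listwhich listwhich_alt
  rw [hstep, hget, judge_known l (fun x => p x v), which_map_eq]

-- ===== VERDICT (by name: the statement is the Claim_ definition above) =====
theorem listwhich_spec : Claim_equal_listwhich := by
  unfold Claim_equal_listwhich Spec_listwhich
  intro l d v _
  by_cases h1 : d = "=="
  · subst h1
    exact known_case l _ v (fun a b => a == b) (by funext judge i; simp [pvJudgeStep]) rfl
  by_cases h2 : d = "!="
  · subst h2
    exact known_case l _ v (fun a b => !(a == b)) (by funext judge i; simp [pvJudgeStep]) rfl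
  by_cases h3 : d = ">"
  · subst h3
    exact known_case l _ v (fun a b => decide (b < a)) (by funext judge i; simp [pvJudgeStep]) rfl
  by_cases h4 : d = ">="
  · subst h4
    exact known_case l _ v (fun a b => decide (b ≤ a)) (by funext judge i; simp [pvJudgeStep]) rfl
  by_cases h5 : d = "<"
  · subst h5
    exact known_case l _ v (fun a b => decide (a < b)) (by funext judge i; simp [pvJudgeStep]) rfl
  by_cases h6 : d = "<="
  · subst h6
    exact known_case l _ v (fun a b => decide (a ≤ b)) (by funext judge i; simp [pvJudgeStep]) rfl
  · unfold listwhich listwhich_alt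
    have hitems : pvOps.items
        = [("==", fun a b => a == b), ("!=", fun a b => !(a == b)),
           (">",  fun a b => decide (b < a)), (">=", fun a b => decide (b ≤ a)),
           ("<",  fun a b => decide (a < b)), ("<=", fun a b => decide (a ≤ b))] := rfl
    have hget : PySem.Dict.get? pvOps d = none := by
      unfold PySem.Dict.get?
      rw [hitems]
      simp [Ne.symm h1, Ne.symm h2, Ne.symm h3, Ne.symm h4, Ne.symm h5, Ne.symm h6]
    have hstep : pvJudgeStep d v l = fun judge _ => judge := by
      funext judge i
      simp [pvJudgeStep, h1, h2, h3, h4, h5, h6]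
    rw [hget, hstep, List.foldl_fixed]
    rfl
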